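-- pv_equiv track=rewrite | github.com/wjdqlsdlsp/coding_test_practice | scoar/1.py | solution
-- ===== SOURCE A (Python) =====
-- from collections import defaultdict
--
-- dx = [1, 0, -1, 0]
--
-- dy = [0, 1, 0, -1]
--
-- def solution(maps):
--     c_len, r_len =len(maps), len(maps[0])
--     meet_list = defaultdict(set)
--
--     for y in range(c_len):
--         for x in range(r_len):
--             now = maps[y][x]
--             if now == '.': continue
--
--             for i in range(4):
--                 check_x, check_y = x+dx[i], y+dy[i]
--                 if 0 <= check_x < r_len and 0<= check_y < c_len:
--                     meet = maps[check_y][check_x]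
--                     if meet != '.' and meet != now:
--                         meet_list[now].add(meet)
--
--     pair_count, max_count = 0, 0
--     for k in meet_list.keys():
--         max_count = max(max_count, len(meet_list[k]))
--         pair_count += len(meet_list[k])
--
--     return [pair_count//2, max_count]
-- ===== SOURCE B (Python) =====
-- def solution(maps):
--     c_len, r_len = len(maps), len(maps[0])
--     edges = set()
--     for y in range(c_len):
--         for x in range(r_len):
--             a = maps[y][x]
--             if a == '.':
--                 continue
--             for nx, ny in ((x + 1, y), (x, y + 1)):
--                 if nx < r_len and ny < c_len:
--                     b = maps[ny][nx]
--                     if b != '.' and b != a: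
--                         edges.add((a, b) if a < b else (b, a))
--     deg = {}
--     for u, v in edges:
--         deg[u] = deg.get(u, 0) + 1
--         deg[v] = deg.get(v, 0) + 1
--     return [len(edges), max(deg.values(), default=0)]
-- ===== Notes on version B (the rewrite author's own statement) =====
-- stated objective: alternative
-- what changed: Instead of a per-region defaultdict of neighbor sets filled from all four directions and then summed and halved, B scans only right/down neighbors accumulating one set of normalized unordered edges, so pair_count is len(edges) with no halving, and the max adjacency count comes from a separate degree-counting pass over the edges.
import Mathlib
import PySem

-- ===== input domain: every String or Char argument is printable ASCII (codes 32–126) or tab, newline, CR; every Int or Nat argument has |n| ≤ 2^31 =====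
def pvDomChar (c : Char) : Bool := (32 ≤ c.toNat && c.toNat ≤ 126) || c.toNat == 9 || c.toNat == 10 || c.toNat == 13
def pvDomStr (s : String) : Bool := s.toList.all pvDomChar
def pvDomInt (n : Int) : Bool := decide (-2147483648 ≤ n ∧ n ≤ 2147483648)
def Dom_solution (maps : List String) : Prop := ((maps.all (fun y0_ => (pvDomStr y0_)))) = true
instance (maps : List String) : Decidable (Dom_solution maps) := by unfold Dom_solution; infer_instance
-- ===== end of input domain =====

-- B replaces A's defaultdict of per-region neighbour sets (scanned in all four directions,
-- summed and halved) by one set of normalized unordered edges collected from right/down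
-- neighbours only, plus a separate degree-counting pass (half the neighbour checks per cell).

-- ===== PORT A =====
def pvDx : List Int := [1, 0, -1, 0]
def pvDy : List Int := [0, 1, 0, -1]
-- maps[y][x]; defaults are never reached on inputs satisfying Pre_solution
def pvCell (maps : List String) (y x : Int) : Char :=
  PySem.List.pyGetD (PySem.List.pyGetD maps y "").toList x '.'

def solution (maps : List String) : List Int :=
  let c_len : Int := maps.length
  let r_len : Int := (PySem.List.pyGetD maps 0 "").toList.length
  let meet_list :=
    (PySem.List.pyRange 0 c_len 1).foldl (fun ml y =>
      (PySem.List.pyRange 0 r_len 1).foldl (fun ml x =>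
        let now := pvCell maps y x
        if now = '.' then ml
        else
          (PySem.List.pyRange 0 4 1).foldl (fun ml i =>
            let check_x := x + PySem.List.pyGetD pvDx i 0
            let check_y := y + PySem.List.pyGetD pvDy i 0
            if 0 ≤ check_x ∧ check_x < r_len ∧ 0 ≤ check_y ∧ check_y < c_len then
              let meet := pvCell maps check_y check_x
              if meet ≠ '.' ∧ meet ≠ now then
                -- meet_list[now].add(meet) on the defaultdict(set)
                PySem.Dict.modify ml now PySem.Set.empty (fun s => PySem.Set.add s meet)
              else ml
            else ml) ml) ml)
      (PySem.Dict.empty : PySem.Dict Char (PySem.Set Char))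
  let pm :=
    meet_list.keys.foldl (fun (pm : Int × Int) k =>
      (pm.1 + ((PySem.Dict.getD meet_list k PySem.Set.empty).length : Int),
       max pm.2 ((PySem.Dict.getD meet_list k PySem.Set.empty).length : Int))) (0, 0)
  [PySem.Int.floordiv pm.1 2, pm.2]

-- ===== PORT B =====
def solution_alt (maps : List String) : List Int :=
  let c_len : Int := maps.length
  let r_len : Int := (PySem.List.pyGetD maps 0 "").toList.length
  let edges : PySem.Set (Char × Char) :=
    (PySem.List.pyRange 0 c_len 1).foldl (fun es y =>
      (PySem.List.pyRange 0 r_len 1).foldl (fun es x =>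
        let a := pvCell maps y x
        if a = '.' then es
        else
          [(x + 1, y), (x, y + 1)].foldl (fun es p =>
            if p.1 < r_len ∧ p.2 < c_len then
              let b := pvCell maps p.2 p.1
              if b ≠ '.' ∧ b ≠ a then
                PySem.Set.add es (if a < b then (a, b) else (b, a))
              else es
            else es) es) es)
      (PySem.Set.empty : PySem.Set (Char × Char))
  let deg : PySem.Dict Char Int :=
    edges.foldl (fun d e =>
      let d1 := PySem.Dict.insert d e.1 (PySem.Dict.getD d e.1 0 + 1)
      PySem.Dict.insert d1 e.2 (PySem.Dict.getD d1 e.2 0 + 1)) PySem.Dict.empty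
  [(edges.length : Int), PySem.List.maxD deg.values (fun v => v) 0]

-- ===== PRECONDITION & SPEC =====
-- Pre_ excludes exactly the inputs where Python A raises IndexError: the empty list
-- (maps[0]) and grids whose first row is longer than some other row (maps[y][x]).
def Pre_solution (maps : List String) : Prop :=
  maps ≠ [] ∧ ∀ s ∈ maps, (maps.headI).toList.length ≤ s.toList.length
instance (maps : List String) : Decidable (Pre_solution maps) := by unfold Pre_solution; infer_instance
def pvWitness_solution : List String := ["AB", "B."]

def Spec_solution (maps : List String) (out : List Int) : Prop := out = solution_alt maps
instance (maps : List String) (out : List Int) : Decidable (Spec_solution maps out) := by unfold Spec_solution; infer_instance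

-- ===== CLAIM (what is proved, stated in full; the proofs are below) =====
def Claim_equal_solution : Prop := ∀ (maps : List String), Dom_solution maps → Pre_solution maps → Spec_solution maps (solution maps)

-- ===== LEMMAS AND PROOFS =====
-- ---- proof-side definitions ----
def pvLen (maps : List String) : Int := ((PySem.List.pyGetD maps 0 "").toList.length : Int)

def pvStepA (ml : PySem.Dict Char (PySem.Set Char)) (e : Char × Char) :
    PySem.Dict Char (PySem.Set Char) :=
  PySem.Dict.modify ml e.1 PySem.Set.empty (fun s => PySem.Set.add s e.2)

def pvEvA (maps : List String) (y x : Int) : List (Char × Char) :=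
  if pvCell maps y x = '.' then []
  else (PySem.List.pyRange 0 4 1).filterMap (fun i =>
    if 0 ≤ x + PySem.List.pyGetD pvDx i 0 ∧ x + PySem.List.pyGetD pvDx i 0 < pvLen maps ∧
       0 ≤ y + PySem.List.pyGetD pvDy i 0 ∧ y + PySem.List.pyGetD pvDy i 0 < (maps.length : Int) then
      if pvCell maps (y + PySem.List.pyGetD pvDy i 0) (x + PySem.List.pyGetD pvDx i 0) ≠ '.' ∧
         pvCell maps (y + PySem.List.pyGetD pvDy i 0) (x + PySem.List.pyGetD pvDx i 0) ≠ pvCell maps y x then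
        some (pvCell maps y x, pvCell maps (y + PySem.List.pyGetD pvDy i 0) (x + PySem.List.pyGetD pvDx i 0))
      else none
    else none)

def pvEventsA (maps : List String) : List (Char × Char) :=
  (PySem.List.pyRange 0 (maps.length : Int) 1).flatMap (fun y =>
    (PySem.List.pyRange 0 (pvLen maps) 1).flatMap (fun x => pvEvA maps y x))

def pvEvB (maps : List String) (y x : Int) : List (Char × Char) :=
  if pvCell maps y x = '.' then []
  else [(x + 1, y), (x, y + 1)].filterMap (fun p =>
    if p.1 < pvLen maps ∧ p.2 < (maps.length : Int) then
      if pvCell maps p.2 p.1 ≠ '.' ∧ pvCell maps p.2 p.1 ≠ pvCell maps y x then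
        some (if pvCell maps y x < pvCell maps p.2 p.1
              then (pvCell maps y x, pvCell maps p.2 p.1)
              else (pvCell maps p.2 p.1, pvCell maps y x))
      else none
    else none)

def pvEventsB (maps : List String) : List (Char × Char) :=
  (PySem.List.pyRange 0 (maps.length : Int) 1).flatMap (fun y =>
    (PySem.List.pyRange 0 (pvLen maps) 1).flatMap (fun x => pvEvB maps y x))

def pvNbrs (maps : List String) (k : Char) : List Char :=
  ((pvEventsA maps).filter (fun e => e.1 == k)).map (·.2)

def pvDegStep (d : PySem.Dict Char Int) (e : Char × Char) : PySem.Dict Char Int :=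
  let d1 := PySem.Dict.insert d e.1 (PySem.Dict.getD d e.1 0 + 1)
  PySem.Dict.insert d1 e.2 (PySem.Dict.getD d1 e.2 0 + 1)

-- horizontal/vertical adjacency with a on the left/top
def pvHV (maps : List String) (a b : Char) : Prop :=
  (∃ y x : Int, 0 ≤ y ∧ y < (maps.length : Int) ∧ 0 ≤ x ∧ x + 1 < pvLen maps ∧
     pvCell maps y x = a ∧ pvCell maps y (x + 1) = b) ∨
  (∃ y x : Int, 0 ≤ y ∧ y + 1 < (maps.length : Int) ∧ 0 ≤ x ∧ x < pvLen maps ∧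
     pvCell maps y x = a ∧ pvCell maps (y + 1) x = b)

-- ---- generic list lemmas ----
lemma pvFoldlFlatMap {α β γ : Type} (g : α → List β) (f : γ → β → γ) :
    ∀ (l : List α) (init : γ), (l.flatMap g).foldl f init = l.foldl (fun acc x => (g x).foldl f acc) init := by
  intro l
  induction l with
  | nil => intro init; rfl
  | cons h t ih => intro init; simp [List.flatMap_cons, List.foldl_append, ih]

lemma pvFoldlFilterMap {α β γ : Type} (g : α → Option β) (f : γ → β → γ) :
    ∀ (l : List α) (init : γ),
      (l.filterMap g).foldl f init = l.foldl (fun acc x => (g x).elim acc (f acc)) init := by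
  intro l
  induction l with
  | nil => intro init; rfl
  | cons h t ih =>
    intro init
    rw [List.filterMap_cons]
    cases hg : g h <;> simp [hg, ih]

lemma pvCountPSplit {α : Type} (p q r : α → Bool) :
    ∀ (l : List α), (∀ e ∈ l, p e = (q e || r e)) → (∀ e ∈ l, ¬(q e = true ∧ r e = true)) →
      l.countP p = l.countP q + l.countP r := by
  intro l
  induction l with
  | nil => intro _ _; rfl
  | cons h t ih =>
    intro hpq hx
    have ih' := ih (fun e he => hpq e (List.mem_cons_of_mem _ he))
      (fun e he => hx e (List.mem_cons_of_mem _ he))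
    have hph := hpq h List.mem_cons_self
    by_cases hq : q h = true <;> by_cases hr : r h = true
    · exact absurd ⟨hq, hr⟩ (hx h List.mem_cons_self)
    all_goals (simp [hph, hq, hr, ih']; try omega)

lemma pvNodupLenEq {α : Type} (l1 l2 : List α) (h1 : l1.Nodup) (h2 : l2.Nodup)
    (h : ∀ x, x ∈ l1 ↔ x ∈ l2) : l1.length = l2.length :=
  ((List.perm_ext_iff_of_nodup h1 h2).2 h).length_eq

lemma pvFoldlMaxMem (f : Char → Int) :
    ∀ (l : List Char) (a : Int),
      l.foldl (fun acc x => max acc (f x)) a = a ∨ ∃ x ∈ l, l.foldl (fun acc x => max acc (f x)) a = f x := by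
  intro l
  induction l with
  | nil => intro a; left; rfl
  | cons h t ih =>
    intro a
    rcases ih (max a (f h)) with hc | ⟨x, hx, he⟩
    · by_cases hm : a ≤ f h
      · right; exact ⟨h, by simp, by simpa [List.foldl, max_eq_right hm] using hc⟩
      · left; simpa [List.foldl, max_eq_left (le_of_not_ge hm)] using hc
    · right; exact ⟨x, by simp [hx], he⟩

def pvMl (maps : List String) : PySem.Dict Char (PySem.Set Char) :=
  (pvEventsA maps).foldl pvStepA PySem.Dict.empty
def pvSz (maps : List String) (k : Char) : Int :=
  ((PySem.Dict.getD (pvMl maps) k PySem.Set.empty).length : Int)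
def pvE (maps : List String) : PySem.Set (Char × Char) := PySem.Set.ofList (pvEventsB maps)
def pvDeg (maps : List String) : PySem.Dict Char Int :=
  (pvE maps).foldl pvDegStep PySem.Dict.empty

-- ---- the ports, rewritten as folds over the flattened event lists ----
lemma pvCellEqA (maps : List String) (y x : Int) (ml : PySem.Dict Char (PySem.Set Char)) :
    (if pvCell maps y x = '.' then ml
     else (PySem.List.pyRange 0 4 1).foldl (fun ml i =>
       if 0 ≤ x + PySem.List.pyGetD pvDx i 0 ∧ x + PySem.List.pyGetD pvDx i 0 < pvLen maps ∧
          0 ≤ y + PySem.List.pyGetD pvDy i 0 ∧ y + PySem.List.pyGetD pvDy i 0 < (maps.length : Int) then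
         if pvCell maps (y + PySem.List.pyGetD pvDy i 0) (x + PySem.List.pyGetD pvDx i 0) ≠ '.' ∧
            pvCell maps (y + PySem.List.pyGetD pvDy i 0) (x + PySem.List.pyGetD pvDx i 0) ≠ pvCell maps y x then
           PySem.Dict.modify ml (pvCell maps y x) PySem.Set.empty (fun s =>
             PySem.Set.add s (pvCell maps (y + PySem.List.pyGetD pvDy i 0) (x + PySem.List.pyGetD pvDx i 0)))
         else ml
       else ml) ml)
    = (pvEvA maps y x).foldl pvStepA ml := by
  by_cases hc : pvCell maps y x = '.'
  · simp [pvEvA, hc]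
  · rw [if_neg hc, pvEvA, if_neg hc, pvFoldlFilterMap]
    apply PySem.List.foldl_congr_mem
    intro acc i _
    split_ifs <;> simp [pvStepA]

lemma pvMeetEq (maps : List String) (init : PySem.Dict Char (PySem.Set Char)) :
    (PySem.List.pyRange 0 (maps.length : Int) 1).foldl (fun ml y =>
      (PySem.List.pyRange 0 (pvLen maps) 1).foldl (fun ml x =>
        if pvCell maps y x = '.' then ml
        else (PySem.List.pyRange 0 4 1).foldl (fun ml i =>
          if 0 ≤ x + PySem.List.pyGetD pvDx i 0 ∧ x + PySem.List.pyGetD pvDx i 0 < pvLen maps ∧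
             0 ≤ y + PySem.List.pyGetD pvDy i 0 ∧ y + PySem.List.pyGetD pvDy i 0 < (maps.length : Int) then
            if pvCell maps (y + PySem.List.pyGetD pvDy i 0) (x + PySem.List.pyGetD pvDx i 0) ≠ '.' ∧
               pvCell maps (y + PySem.List.pyGetD pvDy i 0) (x + PySem.List.pyGetD pvDx i 0) ≠ pvCell maps y x then
              PySem.Dict.modify ml (pvCell maps y x) PySem.Set.empty (fun s =>
                PySem.Set.add s (pvCell maps (y + PySem.List.pyGetD pvDy i 0) (x + PySem.List.pyGetD pvDx i 0)))
            else ml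
          else ml) ml) ml) init
    = (pvEventsA maps).foldl pvStepA init := by
  rw [pvEventsA, pvFoldlFlatMap]
  apply PySem.List.foldl_congr_mem
  intro acc y _
  rw [pvFoldlFlatMap]
  apply PySem.List.foldl_congr_mem
  intro acc2 x _
  exact pvCellEqA maps y x acc2

lemma pvCharA (maps : List String) :
    solution maps =
      [PySem.Int.floordiv (((pvMl maps).keys.map (pvSz maps)).sum) 2,
       (pvMl maps).keys.foldl (fun acc k => max acc (pvSz maps k)) 0] := by
  simp only [solution]
  rw [show (((PySem.List.pyGetD maps 0 "").toList.length : Nat) : Int) = pvLen maps from rfl]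
  rw [pvMeetEq, ← pvMl]
  rw [PySem.List.foldl_prod_mk
        (f := fun (s : Int) k => s + ((PySem.Dict.getD (pvMl maps) k PySem.Set.empty).length : Int))
        (g := fun (s : Int) k => max s ((PySem.Dict.getD (pvMl maps) k PySem.Set.empty).length : Int))]
  rw [PySem.List.foldl_add]
  have hsz : pvSz maps = fun k => ((List.length (PySem.Dict.getD (pvMl maps) k PySem.Set.empty)) : Int) := by
    funext k; rfl
  rw [hsz]
  simp

lemma pvCellEqB (maps : List String) (y x : Int) (es : PySem.Set (Char × Char)) :
    (if pvCell maps y x = '.' then es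
     else [(x + 1, y), (x, y + 1)].foldl (fun es p =>
       if p.1 < pvLen maps ∧ p.2 < (maps.length : Int) then
         if pvCell maps p.2 p.1 ≠ '.' ∧ pvCell maps p.2 p.1 ≠ pvCell maps y x then
           PySem.Set.add es (if pvCell maps y x < pvCell maps p.2 p.1
             then (pvCell maps y x, pvCell maps p.2 p.1)
             else (pvCell maps p.2 p.1, pvCell maps y x))
         else es
       else es) es)
    = (pvEvB maps y x).foldl PySem.Set.add es := by
  by_cases hc : pvCell maps y x = '.'
  · simp [pvEvB, hc]
  · rw [if_neg hc, pvEvB, if_neg hc, pvFoldlFilterMap]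
    apply PySem.List.foldl_congr_mem
    intro acc p _
    split_ifs <;> simp

lemma pvEdgesEq (maps : List String) (init : PySem.Set (Char × Char)) :
    (PySem.List.pyRange 0 (maps.length : Int) 1).foldl (fun es y =>
      (PySem.List.pyRange 0 (pvLen maps) 1).foldl (fun es x =>
        if pvCell maps y x = '.' then es
        else [(x + 1, y), (x, y + 1)].foldl (fun es p =>
          if p.1 < pvLen maps ∧ p.2 < (maps.length : Int) then
            if pvCell maps p.2 p.1 ≠ '.' ∧ pvCell maps p.2 p.1 ≠ pvCell maps y x then
              PySem.Set.add es (if pvCell maps y x < pvCell maps p.2 p.1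
                then (pvCell maps y x, pvCell maps p.2 p.1)
                else (pvCell maps p.2 p.1, pvCell maps y x))
            else es
          else es) es) es) init
    = (pvEventsB maps).foldl PySem.Set.add init := by
  rw [pvEventsB, pvFoldlFlatMap]
  apply PySem.List.foldl_congr_mem
  intro acc y _
  rw [pvFoldlFlatMap]
  apply PySem.List.foldl_congr_mem
  intro acc2 x _
  exact pvCellEqB maps y x acc2

lemma pvCharB (maps : List String) :
    solution_alt maps =
      [((pvE maps).length : Int), PySem.List.maxD (pvDeg maps).values (fun v => v) 0] := by
  simp only [solution_alt]
  rw [show (((PySem.List.pyGetD maps 0 "").toList.length : Nat) : Int) = pvLen maps from rfl]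
  rw [pvEdgesEq]
  have he : (pvEventsB maps).foldl PySem.Set.add PySem.Set.empty = pvE maps := by
    rw [pvE, PySem.Set.ofList_eq_foldl]; rfl
  rw [he]
  have hd : ((pvE maps).foldl (fun d (e : Char × Char) =>
      PySem.Dict.insert (PySem.Dict.insert d e.1 (PySem.Dict.getD d e.1 0 + 1)) e.2
        (PySem.Dict.getD (PySem.Dict.insert d e.1 (PySem.Dict.getD d e.1 0 + 1)) e.2 0 + 1))
      PySem.Dict.empty) = pvDeg maps := by
    rw [pvDeg]
    apply PySem.List.foldl_congr_mem
    intro acc e _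
    simp [pvDegStep]
  rw [hd]

-- ---- characterizing the defaultdict-of-sets fold ----
lemma pvFoldStepAGetD :
    ∀ (l : List (Char × Char)) (d : PySem.Dict Char (PySem.Set Char)) (k : Char),
      PySem.Dict.getD (l.foldl pvStepA d) k PySem.Set.empty
        = PySem.Set.update (PySem.Dict.getD d k PySem.Set.empty)
            ((l.filter (fun e => e.1 == k)).map (·.2)) := by
  intro l
  induction l with
  | nil => intro d k; simp [PySem.Set.update_nil]
  | cons e t ih =>
    intro d k
    rw [List.foldl_cons, ih]
    by_cases hk : e.1 = k
    · have hbe : (e.1 == k) = true := beq_iff_eq.2 hk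
      rw [show List.filter (fun e => e.1 == k) (e :: t) = e :: List.filter (fun e => e.1 == k) t
            from List.filter_cons_of_pos hbe, List.map_cons, PySem.Set.update_cons]
      congr 1
      rw [pvStepA, PySem.Dict.getD_modify, if_pos hk.symm, hk]
    · have hbe : (e.1 == k) = false := beq_eq_false_iff_ne.2 hk
      rw [show List.filter (fun e => e.1 == k) (e :: t) = List.filter (fun e => e.1 == k) t
            from List.filter_cons_of_neg (by simp [hbe])]
      congr 1
      rw [pvStepA, PySem.Dict.getD_modify, if_neg (fun h => hk h.symm)]

lemma pvMlGetD (maps : List String) (k : Char) :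
    PySem.Dict.getD (pvMl maps) k PySem.Set.empty = PySem.Set.ofList (pvNbrs maps k) := by
  rw [pvMl, pvFoldStepAGetD, PySem.Dict.getD_empty, PySem.Set.update_empty, pvNbrs]

lemma pvFoldStepAKeys :
    ∀ (l : List (Char × Char)) (d : PySem.Dict Char (PySem.Set Char)) (k : Char),
      k ∈ (l.foldl pvStepA d).keys ↔ k ∈ d.keys ∨ ∃ b, (k, b) ∈ l := by
  intro l
  induction l with
  | nil => intro d k; simp
  | cons e t ih =>
    intro d k
    rw [List.foldl_cons, ih]
    constructor
    · rintro (hm | ⟨b, hb⟩)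
      · rw [pvStepA, PySem.Dict.keys_modify, PySem.Dict.mem_keys_insert] at hm
        rcases hm with h | h
        · exact Or.inr ⟨e.2, by simp [h]⟩
        · exact Or.inl h
      · exact Or.inr ⟨b, List.mem_cons_of_mem _ hb⟩
    · rintro (hm | ⟨b, hb⟩)
      · exact Or.inl (by rw [pvStepA, PySem.Dict.keys_modify, PySem.Dict.mem_keys_insert]; exact Or.inr hm)
      · rcases List.mem_cons.1 hb with h | h
        · left
          rw [pvStepA, PySem.Dict.keys_modify, PySem.Dict.mem_keys_insert]
          exact Or.inl (by rw [← h])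
        · exact Or.inr ⟨b, h⟩

lemma pvMlKeysMem (maps : List String) (k : Char) :
    k ∈ (pvMl maps).keys ↔ ∃ b, (k, b) ∈ pvEventsA maps := by
  rw [pvMl, pvFoldStepAKeys]; simp

lemma pvFoldStepANodupKeys :
    ∀ (l : List (Char × Char)) (d : PySem.Dict Char (PySem.Set Char)),
      d.keys.Nodup → (l.foldl pvStepA d).keys.Nodup := by
  intro l
  induction l with
  | nil => intro d hd; exact hd
  | cons e t ih =>
    intro d hd
    apply ih
    rw [pvStepA, PySem.Dict.keys_modify]
    exact PySem.Dict.nodup_keys_insert _ _ _ hd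

lemma pvMlNodupKeys (maps : List String) : (pvMl maps).keys.Nodup :=
  pvFoldStepANodupKeys _ _ (by simp [PySem.Dict.keys_empty])

-- ---- characterizing the degree fold ----
lemma pvFoldDegGetD :
    ∀ (l : List (Char × Char)) (d : PySem.Dict Char Int) (v : Char),
      PySem.Dict.getD (l.foldl pvDegStep d) v 0
        = PySem.Dict.getD d v 0 + (l.countP (fun e => e.1 == v) : Int) + (l.countP (fun e => e.2 == v) : Int) := by
  intro l
  induction l with
  | nil => intro d v; simp
  | cons e t ih =>
    intro d v
    rw [List.foldl_cons, ih]
    have hstep : PySem.Dict.getD (pvDegStep d e) v 0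
        = PySem.Dict.getD d v 0 + (if e.1 = v then 1 else 0) + (if e.2 = v then 1 else 0) := by
      rw [pvDegStep]
      simp only [PySem.Dict.getD_insert]
      split_ifs <;> subst_vars <;> simp_all
    rw [hstep]
    simp only [List.countP_cons]
    by_cases h1 : e.1 = v <;> by_cases h2 : e.2 = v <;>
      simp [h1, h2] <;> try (push_cast; ring)

lemma pvFoldDegKeys :
    ∀ (l : List (Char × Char)) (d : PySem.Dict Char Int) (v : Char),
      v ∈ (l.foldl pvDegStep d).keys ↔ v ∈ d.keys ∨ ∃ e ∈ l, e.1 = v ∨ e.2 = v := by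
  intro l
  induction l with
  | nil => intro d v; simp
  | cons e t ih =>
    intro d v
    have hstep : v ∈ (pvDegStep d e).keys ↔ v = e.1 ∨ v = e.2 ∨ v ∈ d.keys := by
      rw [pvDegStep]
      simp only [PySem.Dict.mem_keys_insert]
      tauto
    rw [List.foldl_cons, ih, hstep]
    simp only [List.mem_cons]
    constructor
    · rintro ((h | h | h) | ⟨x, hx, ho⟩)
      · exact Or.inr ⟨e, Or.inl rfl, Or.inl h.symm⟩
      · exact Or.inr ⟨e, Or.inl rfl, Or.inr h.symm⟩
      · exact Or.inl h
      · exact Or.inr ⟨x, Or.inr hx, ho⟩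
    · rintro (h | ⟨x, hx | hx, ho⟩)
      · exact Or.inl (Or.inr (Or.inr h))
      · subst hx
        rcases ho with h | h
        · exact Or.inl (Or.inl h.symm)
        · exact Or.inl (Or.inr (Or.inl h.symm))
      · exact Or.inr ⟨x, hx, ho⟩

lemma pvFoldDegNodupKeys :
    ∀ (l : List (Char × Char)) (d : PySem.Dict Char Int),
      d.keys.Nodup → (l.foldl pvDegStep d).keys.Nodup := by
  intro l
  induction l with
  | nil => intro d hd; exact hd
  | cons e t ih =>
    intro d hd
    apply ih
    rw [pvDegStep]
    exact PySem.Dict.nodup_keys_insert _ _ _ (PySem.Dict.nodup_keys_insert _ _ _ hd)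

-- values of a dict with nodup keys
lemma pvMemValues (d : PySem.Dict Char Int) (hd : d.keys.Nodup) (x : Int) :
    x ∈ d.values ↔ ∃ k ∈ d.keys, PySem.Dict.getD d k 0 = x := by
  constructor
  · intro hx
    have : ∃ p ∈ d.items, p.2 = x := by
      simpa [show d.values = d.items.map (·.2) from rfl, List.mem_map] using hx
    rcases this with ⟨p, hp, he⟩
    refine ⟨p.1, PySem.Dict.mem_keys_of_mem_items d hp, ?_⟩
    rw [PySem.Dict.getD_of_mem_items d (k := p.1) (v := p.2) hp hd]
    exact he
  · rintro ⟨k, hk, he⟩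
    have : ∃ p ∈ d.items, p.1 = k := by
      simpa [show d.keys = d.items.map (·.1) from rfl, List.mem_map] using hk
    rcases this with ⟨p, hp, he1⟩
    have hgd := PySem.Dict.getD_of_mem_items d (k := p.1) (v := p.2) hp hd 0
    rw [he1, he] at hgd
    have hv : p.2 = x := hgd.symm
    have : p.2 ∈ d.values := by
      rw [show d.values = d.items.map (·.2) from rfl]
      exact List.mem_map_of_mem hp
    rwa [hv] at this

-- ---- membership in the event lists ----
lemma pvRange4 : PySem.List.pyRange 0 4 1 = [0, 1, 2, 3] := by decide

lemma pvMemA (maps : List String) (a b : Char) :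
    (a, b) ∈ pvEventsA maps ↔
      a ≠ '.' ∧ b ≠ '.' ∧ b ≠ a ∧ (pvHV maps a b ∨ pvHV maps b a) := by
  constructor
  · intro hm
    rw [pvEventsA] at hm
    simp only [List.mem_flatMap, PySem.List.mem_pyRange_one] at hm
    rcases hm with ⟨y, ⟨hy0, hyc⟩, x, ⟨hx0, hxr⟩, hmem⟩
    rw [pvEvA] at hmem
    by_cases hc : pvCell maps y x = '.'
    · rw [if_pos hc] at hmem; exact absurd hmem (List.not_mem_nil)
    rw [if_neg hc, pvRange4, List.mem_filterMap] at hmem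
    rcases hmem with ⟨i, hi, hf⟩
    simp only [List.mem_cons, List.not_mem_nil, or_false] at hi
    rcases hi with rfl | rfl | rfl | rfl <;>
      [(rw [show PySem.List.pyGetD pvDx (0:Int) 0 = 1 from by decide,
            show PySem.List.pyGetD pvDy (0:Int) 0 = 0 from by decide] at hf);
       (rw [show PySem.List.pyGetD pvDx (1:Int) 0 = 0 from by decide,
            show PySem.List.pyGetD pvDy (1:Int) 0 = 1 from by decide] at hf);
       (rw [show PySem.List.pyGetD pvDx (2:Int) 0 = -1 from by decide,
            show PySem.List.pyGetD pvDy (2:Int) 0 = 0 from by decide] at hf);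
       (rw [show PySem.List.pyGetD pvDx (3:Int) 0 = 0 from by decide,
            show PySem.List.pyGetD pvDy (3:Int) 0 = -1 from by decide] at hf)] <;>
      rw [add_zero] at hf <;>
      split_ifs at hf with hg hg2 <;>
      simp only [Option.some.injEq, Prod.mk.injEq] at hf <;>
      rcases hf with ⟨rfl, rfl⟩
    · -- i = 0 : right neighbour
      exact ⟨hc, hg2.1, hg2.2, Or.inl (Or.inl ⟨y, x, hy0, hyc, hx0, hg.2.1, rfl, rfl⟩)⟩
    · -- i = 1 : down neighbour
      exact ⟨hc, hg2.1, hg2.2, Or.inl (Or.inr ⟨y, x, hy0, hg.2.2.2, hx0, hxr, rfl, rfl⟩)⟩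
    · -- i = 2 : left neighbour
      refine ⟨hc, hg2.1, hg2.2, Or.inr (Or.inl ⟨y, x + -1, hy0, hyc, hg.1, by omega, rfl, ?_⟩)⟩
      rw [show x + -1 + 1 = x from by ring]
    · -- i = 3 : up neighbour
      refine ⟨hc, hg2.1, hg2.2, Or.inr (Or.inr ⟨y + -1, x, hg.2.2.1, by omega, hx0, hxr, rfl, ?_⟩)⟩
      rw [show y + -1 + 1 = y from by ring]
  · rintro ⟨ha, hb, hba, hHV | hHV⟩
    all_goals rw [pvEventsA]; simp only [List.mem_flatMap, PySem.List.mem_pyRange_one]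
    · rcases hHV with ⟨y, x, hy0, hyc, hx0, hxr1, hcy, hcx⟩ | ⟨y, x, hy0, hyc1, hx0, hxr, hcy, hcx⟩
      · -- a left of b, emit at (y, x) looking right (i = 0)
        refine ⟨y, ⟨hy0, hyc⟩, x, ⟨hx0, by omega⟩, ?_⟩
        rw [pvEvA, hcy, if_neg ha, pvRange4, List.mem_filterMap]
        refine ⟨0, by simp, ?_⟩
        rw [show PySem.List.pyGetD pvDx (0:Int) 0 = 1 from by decide,
            show PySem.List.pyGetD pvDy (0:Int) 0 = 0 from by decide, add_zero]
        rw [if_pos ⟨by omega, hxr1, hy0, hyc⟩, hcx, if_pos ⟨hb, fun h => hba h⟩]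
      · -- a above b, emit at (y, x) looking down (i = 1)
        refine ⟨y, ⟨hy0, by omega⟩, x, ⟨hx0, hxr⟩, ?_⟩
        rw [pvEvA, hcy, if_neg ha, pvRange4, List.mem_filterMap]
        refine ⟨1, by simp, ?_⟩
        rw [show PySem.List.pyGetD pvDx (1:Int) 0 = 0 from by decide,
            show PySem.List.pyGetD pvDy (1:Int) 0 = 1 from by decide, add_zero]
        rw [if_pos ⟨hx0, hxr, by omega, hyc1⟩, hcx, if_pos ⟨hb, fun h => hba h⟩]
    · rcases hHV with ⟨y, x, hy0, hyc, hx0, hxr1, hcy, hcx⟩ | ⟨y, x, hy0, hyc1, hx0, hxr, hcy, hcx⟩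
      · -- b left of a, emit at (y, x+1) looking left (i = 2)
        refine ⟨y, ⟨hy0, hyc⟩, x + 1, ⟨by omega, hxr1⟩, ?_⟩
        rw [pvEvA, hcx, if_neg ha, pvRange4, List.mem_filterMap]
        refine ⟨2, by simp, ?_⟩
        rw [show PySem.List.pyGetD pvDx (2:Int) 0 = -1 from by decide,
            show PySem.List.pyGetD pvDy (2:Int) 0 = 0 from by decide, add_zero]
        rw [show x + 1 + -1 = x from by ring]
        rw [if_pos ⟨hx0, by omega, hy0, hyc⟩, hcy, if_pos ⟨hb, fun h => hba h⟩]
      · -- b above a, emit at (y+1, x) looking up (i = 3)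
        refine ⟨y + 1, ⟨by omega, hyc1⟩, x, ⟨hx0, hxr⟩, ?_⟩
        rw [pvEvA, hcx, if_neg ha, pvRange4, List.mem_filterMap]
        refine ⟨3, by simp, ?_⟩
        rw [show PySem.List.pyGetD pvDx (3:Int) 0 = 0 from by decide,
            show PySem.List.pyGetD pvDy (3:Int) 0 = -1 from by decide, add_zero]
        rw [show y + 1 + -1 = y from by ring]
        rw [if_pos ⟨hx0, hxr, hy0, by omega⟩, hcy, if_pos ⟨hb, fun h => hba h⟩]

lemma pvMemB (maps : List String) (p q : Char) :
    (p, q) ∈ pvEventsB maps ↔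
      p < q ∧ p ≠ '.' ∧ q ≠ '.' ∧ (pvHV maps p q ∨ pvHV maps q p) := by
  constructor
  · intro hm
    rw [pvEventsB] at hm
    simp only [List.mem_flatMap, PySem.List.mem_pyRange_one] at hm
    rcases hm with ⟨y, ⟨hy0, hyc⟩, x, ⟨hx0, hxr⟩, hmem⟩
    rw [pvEvB] at hmem
    by_cases hc : pvCell maps y x = '.'
    · rw [if_pos hc] at hmem; exact absurd hmem (List.not_mem_nil)
    rw [if_neg hc, List.mem_filterMap] at hmem
    rcases hmem with ⟨pr, hpr, hf⟩
    simp only [List.mem_cons, List.not_mem_nil, or_false] at hpr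
    rcases hpr with rfl | rfl
    · split_ifs at hf with hg hg2 hlt
      · simp only [Option.some.injEq, Prod.mk.injEq] at hf
        rcases hf with ⟨rfl, rfl⟩
        exact ⟨hlt, hc, hg2.1, Or.inl (Or.inl ⟨y, x, hy0, hyc, hx0, hg.1, rfl, rfl⟩)⟩
      · simp only [Option.some.injEq, Prod.mk.injEq] at hf
        rcases hf with ⟨rfl, rfl⟩
        refine ⟨?_, hg2.1, hc, Or.inr (Or.inl ⟨y, x, hy0, hyc, hx0, hg.1, rfl, rfl⟩)⟩
        rcases lt_trichotomy (pvCell maps y (x + 1)) (pvCell maps y x) with h | h | h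
        · exact h
        · exact absurd h hg2.2
        · exact absurd h hlt
    · split_ifs at hf with hg hg2 hlt
      · simp only [Option.some.injEq, Prod.mk.injEq] at hf
        rcases hf with ⟨rfl, rfl⟩
        exact ⟨hlt, hc, hg2.1, Or.inl (Or.inr ⟨y, x, hy0, hg.2, hx0, hxr, rfl, rfl⟩)⟩
      · simp only [Option.some.injEq, Prod.mk.injEq] at hf
        rcases hf with ⟨rfl, rfl⟩
        refine ⟨?_, hg2.1, hc, Or.inr (Or.inr ⟨y, x, hy0, hg.2, hx0, hxr, rfl, rfl⟩)⟩
        rcases lt_trichotomy (pvCell maps (y + 1) x) (pvCell maps y x) with h | h | h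
        · exact h
        · exact absurd h hg2.2
        · exact absurd h hlt
  · rintro ⟨hpq, hp, hq, hHV | hHV⟩
    all_goals rw [pvEventsB]; simp only [List.mem_flatMap, PySem.List.mem_pyRange_one]
    · rcases hHV with ⟨y, x, hy0, hyc, hx0, hxr1, hcy, hcx⟩ | ⟨y, x, hy0, hyc1, hx0, hxr, hcy, hcx⟩
      · refine ⟨y, ⟨hy0, hyc⟩, x, ⟨hx0, by omega⟩, ?_⟩
        rw [pvEvB, hcy, if_neg hp, List.mem_filterMap]
        refine ⟨(x + 1, y), by simp, ?_⟩
        rw [if_pos ⟨hxr1, hyc⟩, hcx, if_pos ⟨hq, ne_of_gt hpq⟩, if_pos hpq]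
      · refine ⟨y, ⟨hy0, by omega⟩, x, ⟨hx0, hxr⟩, ?_⟩
        rw [pvEvB, hcy, if_neg hp, List.mem_filterMap]
        refine ⟨(x, y + 1), by simp, ?_⟩
        rw [if_pos ⟨hxr, hyc1⟩, hcx, if_pos ⟨hq, ne_of_gt hpq⟩, if_pos hpq]
    · rcases hHV with ⟨y, x, hy0, hyc, hx0, hxr1, hcy, hcx⟩ | ⟨y, x, hy0, hyc1, hx0, hxr, hcy, hcx⟩
      · refine ⟨y, ⟨hy0, hyc⟩, x, ⟨hx0, by omega⟩, ?_⟩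
        rw [pvEvB, hcy, if_neg hq, List.mem_filterMap]
        refine ⟨(x + 1, y), by simp, ?_⟩
        rw [if_pos ⟨hxr1, hyc⟩, hcx, if_pos ⟨hp, ne_of_lt hpq⟩, if_neg (fun h => absurd (h.trans hpq) (lt_irrefl q))]
      · refine ⟨y, ⟨hy0, by omega⟩, x, ⟨hx0, hxr⟩, ?_⟩
        rw [pvEvB, hcy, if_neg hq, List.mem_filterMap]
        refine ⟨(x, y + 1), by simp, ?_⟩
        rw [if_pos ⟨hxr, hyc1⟩, hcx, if_pos ⟨hp, ne_of_lt hpq⟩, if_neg (fun h => absurd (h.trans hpq) (lt_irrefl q))]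

lemma pvSymA (maps : List String) (a b : Char) :
    (a, b) ∈ pvEventsA maps ↔ (b, a) ∈ pvEventsA maps := by
  rw [pvMemA, pvMemA]
  constructor <;> rintro ⟨h1, h2, h3, h4⟩ <;> exact ⟨h2, h1, fun h => h3 h.symm, h4.symm⟩

lemma pvNeA (maps : List String) (a b : Char) (h : (a, b) ∈ pvEventsA maps) : b ≠ a :=
  ((pvMemA maps a b).1 h).2.2.1

lemma pvBA (maps : List String) (p q : Char) :
    (p, q) ∈ pvEventsB maps ↔ p < q ∧ (p, q) ∈ pvEventsA maps := by
  rw [pvMemB, pvMemA]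
  constructor
  · rintro ⟨hlt, h1, h2, h3⟩
    exact ⟨hlt, h1, h2, ne_of_gt hlt, h3⟩
  · rintro ⟨hlt, h1, h2, _, h3⟩
    exact ⟨hlt, h1, h2, h3⟩

-- ---- counting ----
def pvDirE (maps : List String) : PySem.Set (Char × Char) := PySem.Set.ofList (pvEventsA maps)

lemma pvMemDirE (maps : List String) (e : Char × Char) :
    e ∈ pvDirE maps ↔ (e.1, e.2) ∈ pvEventsA maps := by
  rw [pvDirE, PySem.Set.mem_ofList]

lemma pvMemE (maps : List String) (e : Char × Char) :
    e ∈ pvE maps ↔ e.1 < e.2 ∧ (e.1, e.2) ∈ pvEventsA maps := by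
  rw [pvE, PySem.Set.mem_ofList, ← pvBA]

-- pvSz k counts the directed events with first component k
lemma pvSzEq (maps : List String) (k : Char) :
    pvSz maps k = (((pvDirE maps).filter (fun e => e.1 == k)).length : Int) := by
  have hsz : pvSz maps k = ((PySem.Set.ofList (pvNbrs maps k)).length : Int) := by
    rw [pvSz, pvMlGetD]
  rw [hsz]
  congr 1
  have hlen : ((pvDirE maps).filter (fun e => e.1 == k)).length
      = (((pvDirE maps).filter (fun e => e.1 == k)).map (·.2)).length := by
    rw [List.length_map]
  rw [hlen]
  apply pvNodupLenEq
  · exact PySem.Set.nodup_ofList _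
  · apply List.Nodup.map_on
    · intro e1 h1 e2 h2 he
      have m1 := (List.mem_filter.1 h1).2
      have m2 := (List.mem_filter.1 h2).2
      have : e1.1 = e2.1 := by
        rw [beq_iff_eq.1 m1, beq_iff_eq.1 m2]
      exact Prod.ext this he
    · exact (PySem.Set.nodup_ofList _).filter _
  · intro c
    rw [PySem.Set.mem_ofList, pvNbrs, List.mem_map, List.mem_map]
    constructor
    · rintro ⟨e, he, rfl⟩
      have hm := List.mem_filter.1 he
      refine ⟨e, List.mem_filter.2 ⟨?_, hm.2⟩, rfl⟩
      rw [pvMemDirE]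
      exact hm.1
    · rintro ⟨e, he, rfl⟩
      have hm := List.mem_filter.1 he
      exact ⟨e, List.mem_filter.2 ⟨(pvMemDirE maps e).1 hm.1, hm.2⟩, rfl⟩

lemma pvSumFilterLen :
    ∀ (K : List Char), K.Nodup → ∀ (E : List (Char × Char)),
      ((K.map (fun k => ((E.filter (fun e => e.1 == k)).length : Int))).sum)
        = ((E.filter (fun e => decide (e.1 ∈ K))).length : Int) := by
  intro K
  induction K with
  | nil => intro _ E; simp
  | cons k K' ih =>
    intro hnd E
    have hk : k ∉ K' := (List.nodup_cons.1 hnd).1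
    have hsplit : E.countP (fun e => decide (e.1 ∈ k :: K'))
        = E.countP (fun e => e.1 == k) + E.countP (fun e => decide (e.1 ∈ K')) := by
      apply pvCountPSplit
      · intro e _
        by_cases h1 : e.1 = k <;> by_cases h2 : e.1 ∈ K' <;> simp [h1, h2]
      · intro e _
        rintro ⟨h1, h2⟩
        exact hk (of_decide_eq_true (by rwa [beq_iff_eq.1 h1] at h2))
    rw [List.map_cons, List.sum_cons, ih (List.nodup_cons.1 hnd).2]
    rw [← List.countP_eq_length_filter, ← List.countP_eq_length_filter,
        ← List.countP_eq_length_filter, hsplit]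
    push_cast
    ring

lemma pvSumSz (maps : List String) :
    (((pvMl maps).keys.map (pvSz maps)).sum) = ((pvDirE maps).length : Int) := by
  have h1 : ((pvMl maps).keys.map (pvSz maps)).sum
      = (((pvMl maps).keys.map (fun k => (((pvDirE maps).filter (fun e => e.1 == k)).length : Int))).sum) := by
    congr 1
    apply List.map_congr_left
    intro k _
    exact pvSzEq maps k
  rw [h1, pvSumFilterLen _ (pvMlNodupKeys maps)]
  congr 2
  apply List.filter_eq_self.2
  intro e he
  have := (pvMemDirE maps e).1 he
  simp only [decide_eq_true_eq]
  exact (pvMlKeysMem maps e.1).2 ⟨e.2, this⟩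

lemma pvDirELen (maps : List String) :
    ((pvDirE maps).length : Int) = 2 * ((pvE maps).length : Int) := by
  have hnd := PySem.Set.nodup_ofList (pvEventsA maps)
  have hsplit : (pvDirE maps).countP (fun _ => true)
      = (pvDirE maps).countP (fun e => decide (e.1 < e.2))
        + (pvDirE maps).countP (fun e => decide (e.2 < e.1)) := by
    apply pvCountPSplit
    · intro e he
      have hne : e.2 ≠ e.1 := pvNeA maps e.1 e.2 ((pvMemDirE maps e).1 he)
      rcases lt_trichotomy e.1 e.2 with h | h | h
      · simp [h]
      · exact absurd h.symm hne
      · simp [h]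
    · intro e _
      rintro ⟨h1, h2⟩
      exact absurd ((of_decide_eq_true h1).trans (of_decide_eq_true h2)) (lt_irrefl e.1)
  have hlt : ((pvDirE maps).filter (fun e => decide (e.1 < e.2))).length = (pvE maps).length := by
    apply pvNodupLenEq
    · exact List.Nodup.filter _ (by rw [pvDirE]; exact PySem.Set.nodup_ofList _)
    · rw [pvE]; exact PySem.Set.nodup_ofList _
    · intro e
      rw [List.mem_filter, pvMemE, pvMemDirE]
      simp [and_comm]
  have hgt : ((pvDirE maps).filter (fun e => decide (e.2 < e.1))).length
      = ((pvDirE maps).filter (fun e => decide (e.1 < e.2))).length := by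
    have hmap : ((pvDirE maps).filter (fun e => decide (e.2 < e.1))).length
        = (((pvDirE maps).filter (fun e => decide (e.2 < e.1))).map Prod.swap).length := by
      rw [List.length_map]
    rw [hmap]
    apply pvNodupLenEq
    · apply List.Nodup.map
      · intro a b h
        exact Prod.swap_injective h
      · exact List.Nodup.filter _ (by rw [pvDirE]; exact PySem.Set.nodup_ofList _)
    · exact List.Nodup.filter _ (by rw [pvDirE]; exact PySem.Set.nodup_ofList _)
    · intro e
      rw [List.mem_map, List.mem_filter]
      constructor
      · rintro ⟨f, hf, rfl⟩
        have hm := List.mem_filter.1 hf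
        refine ⟨?_, by simpa using hm.2⟩
        rw [pvMemDirE] at hm ⊢
        exact (pvSymA maps f.1 f.2).1 hm.1
      · rintro ⟨he, hcond⟩
        refine ⟨e.swap, List.mem_filter.2 ⟨?_, by simpa using hcond⟩, by simp⟩
        rw [pvMemDirE] at he ⊢
        exact (pvSymA maps e.1 e.2).1 he
  have hsplit2 : (pvDirE maps).length
      = ((pvDirE maps).filter (fun e => decide (e.1 < e.2))).length
        + ((pvDirE maps).filter (fun e => decide (e.2 < e.1))).length := by
    have h := hsplit
    rw [List.countP_eq_length_filter (p := fun e : Char × Char => decide (e.1 < e.2)),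
        List.countP_eq_length_filter (p := fun e : Char × Char => decide (e.2 < e.1))] at h
    rw [← congrFun List.countP_true (pvDirE maps)]
    exact h
  rw [hsplit2, hgt, hlt]
  push_cast
  ring

-- degrees equal neighbour-set sizes
lemma pvDegGetD (maps : List String) (v : Char) :
    PySem.Dict.getD (pvDeg maps) v 0 = pvSz maps v := by
  rw [pvDeg, pvFoldDegGetD, PySem.Dict.getD_empty]
  have hfst : ((pvE maps).countP (fun e => e.1 == v))
      = ((PySem.Set.ofList (pvNbrs maps v)).filter (fun b => decide (v < b))).length := by
    rw [List.countP_eq_length_filter]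
    have hmap : ((pvE maps).filter (fun e => e.1 == v)).length
        = (((pvE maps).filter (fun e => e.1 == v)).map (·.2)).length := by rw [List.length_map]
    rw [hmap]
    apply pvNodupLenEq
    · apply List.Nodup.map_on
      · intro e1 h1 e2 h2 he
        have m1 := (List.mem_filter.1 h1).2
        have m2 := (List.mem_filter.1 h2).2
        exact Prod.ext (by rw [beq_iff_eq.1 m1, beq_iff_eq.1 m2]) he
      · exact List.Nodup.filter _ (by rw [pvE]; exact PySem.Set.nodup_ofList _)
    · exact List.Nodup.filter _ (PySem.Set.nodup_ofList _)
    · intro c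
      rw [List.mem_map, List.mem_filter, PySem.Set.mem_ofList, pvNbrs, List.mem_map]
      constructor
      · rintro ⟨e, he, rfl⟩
        have hm := List.mem_filter.1 he
        have hv := beq_iff_eq.1 hm.2
        have hmm := (pvMemE maps e).1 hm.1
        rw [hv] at hmm
        exact ⟨⟨(v, e.2), List.mem_filter.2 ⟨hmm.2, by simp⟩, rfl⟩, by simpa using hmm.1⟩
      · rintro ⟨⟨e, he, rfl⟩, hlt⟩
        have hm := List.mem_filter.1 he
        have hv := beq_iff_eq.1 hm.2
        refine ⟨(v, e.2), List.mem_filter.2 ⟨?_, by simp⟩, rfl⟩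
        rw [pvMemE]
        refine ⟨by simpa using hlt, ?_⟩
        rw [← hv]
        exact hm.1
  have hsnd : ((pvE maps).countP (fun e => e.2 == v))
      = ((PySem.Set.ofList (pvNbrs maps v)).filter (fun b => decide (b < v))).length := by
    rw [List.countP_eq_length_filter]
    have hmap : ((pvE maps).filter (fun e => e.2 == v)).length
        = (((pvE maps).filter (fun e => e.2 == v)).map (·.1)).length := by rw [List.length_map]
    rw [hmap]
    apply pvNodupLenEq
    · apply List.Nodup.map_on
      · intro e1 h1 e2 h2 he
        have m1 := (List.mem_filter.1 h1).2
        have m2 := (List.mem_filter.1 h2).2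
        exact Prod.ext he (by rw [beq_iff_eq.1 m1, beq_iff_eq.1 m2])
      · exact List.Nodup.filter _ (by rw [pvE]; exact PySem.Set.nodup_ofList _)
    · exact List.Nodup.filter _ (PySem.Set.nodup_ofList _)
    · intro c
      rw [List.mem_map, List.mem_filter, PySem.Set.mem_ofList, pvNbrs, List.mem_map]
      constructor
      · rintro ⟨e, he, rfl⟩
        have hm := List.mem_filter.1 he
        have hv := beq_iff_eq.1 hm.2
        have hmm := (pvMemE maps e).1 hm.1
        rw [hv] at hmm
        refine ⟨⟨(v, e.1), List.mem_filter.2 ⟨(pvSymA maps e.1 v).1 hmm.2, by simp⟩, rfl⟩,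
          by simpa using hmm.1⟩
      · rintro ⟨⟨e, he, rfl⟩, hlt⟩
        have hm := List.mem_filter.1 he
        have hv := beq_iff_eq.1 hm.2
        refine ⟨(e.2, v), List.mem_filter.2 ⟨?_, by simp⟩, rfl⟩
        rw [pvMemE]
        refine ⟨by simpa using hlt, ?_⟩
        apply (pvSymA maps v e.2).1
        rw [← hv]
        exact hm.1
  have htot : ((PySem.Set.ofList (pvNbrs maps v)).filter (fun b => decide (v < b))).length
      + ((PySem.Set.ofList (pvNbrs maps v)).filter (fun b => decide (b < v))).length
      = (PySem.Set.ofList (pvNbrs maps v)).length := by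
    rw [← List.countP_eq_length_filter, ← List.countP_eq_length_filter]
    rw [show (PySem.Set.ofList (pvNbrs maps v)).length
          = (PySem.Set.ofList (pvNbrs maps v)).countP (fun _ => true)
        from (congrFun List.countP_true _).symm]
    symm
    apply pvCountPSplit
    · intro c hc
      have hcm := (PySem.Set.mem_ofList _ _).1 hc
      rw [pvNbrs, List.mem_map] at hcm
      rcases hcm with ⟨e, he, rfl⟩
      have hm := List.mem_filter.1 he
      have hv := beq_iff_eq.1 hm.2
      have hne : e.2 ≠ v := by
        have := pvNeA maps e.1 e.2 hm.1
        rwa [hv] at this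
      rcases lt_trichotomy v e.2 with h | h | h
      · simp [h]
      · exact absurd h.symm hne
      · simp [h]
    · intro c _
      rintro ⟨h1, h2⟩
      exact absurd ((of_decide_eq_true h1).trans (of_decide_eq_true h2)) (lt_irrefl v)
  rw [hfst, hsnd]
  rw [pvSz, pvMlGetD]
  omega

lemma pvDegKeysIff (maps : List String) (v : Char) :
    v ∈ (pvDeg maps).keys ↔ v ∈ (pvMl maps).keys := by
  rw [pvDeg, pvFoldDegKeys, pvMlKeysMem]
  simp only [PySem.Dict.keys_empty, List.not_mem_nil, false_or]
  constructor
  · rintro ⟨e, he, h | h⟩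
    · refine ⟨e.2, ?_⟩
      have := (pvMemE maps e).1 he
      rw [← h]
      exact this.2
    · refine ⟨e.1, ?_⟩
      have := (pvMemE maps e).1 he
      rw [← h]
      exact (pvSymA maps e.1 e.2).1 this.2
  · rintro ⟨b, hb⟩
    have hne : b ≠ v := pvNeA maps v b hb
    rcases lt_trichotomy v b with h | h | h
    · refine ⟨(v, b), ?_, Or.inl rfl⟩
      rw [pvMemE]
      exact ⟨h, hb⟩
    · exact absurd h.symm hne
    · refine ⟨(b, v), ?_, Or.inr rfl⟩
      rw [pvMemE]
      exact ⟨h, (pvSymA maps v b).1 hb⟩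

lemma pvDegNodupKeys (maps : List String) : (pvDeg maps).keys.Nodup := by
  rw [pvDeg]
  exact pvFoldDegNodupKeys _ _ (by simp [PySem.Dict.keys_empty])

-- the two max computations agree
lemma pvMaxEq (maps : List String) :
    (pvMl maps).keys.foldl (fun acc k => max acc (pvSz maps k)) 0
      = PySem.List.maxD (pvDeg maps).values (fun v => v) 0 := by
  set A := (pvMl maps).keys.foldl (fun acc k => max acc (pvSz maps k)) 0 with hA
  set B := PySem.List.maxD (pvDeg maps).values (fun v => v) 0 with hB
  have hSznn : ∀ k, 0 ≤ pvSz maps k := by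
    intro k; rw [pvSz]; positivity
  have hAub := PySem.List.le_foldl_max_int (pvMl maps).keys (pvSz maps) 0
  have hAmem := pvFoldlMaxMem (pvSz maps) (pvMl maps).keys 0
  cases hmv : PySem.List.max? (pvDeg maps).values (fun v => v) with
  | none =>
    have hvals : (pvDeg maps).values = [] := (PySem.List.max?_eq_none_iff _ _).1 hmv
    have hBz : B = 0 := by rw [hB, PySem.List.maxD.eq_def, hmv]; rfl
    have hkeys : (pvDeg maps).keys = [] := by
      by_contra hne
      rcases List.exists_mem_of_ne_nil _ hne with ⟨k, hk⟩
      have : PySem.Dict.getD (pvDeg maps) k 0 ∈ (pvDeg maps).values :=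
        (pvMemValues (pvDeg maps) (pvDegNodupKeys maps) _).2 ⟨k, hk, rfl⟩
      rw [hvals] at this
      exact absurd this (List.not_mem_nil)
    have hmlkeys : (pvMl maps).keys = [] := by
      rw [List.eq_nil_iff_forall_not_mem]
      intro k hk
      have := (pvDegKeysIff maps k).2 hk
      rw [hkeys] at this
      exact absurd this (List.not_mem_nil)
    rw [hBz, hA, hmlkeys]
    rfl
  | some m =>
    have hBm : B = m := by rw [hB, PySem.List.maxD.eq_def, hmv]; rfl
    have hmmem : m ∈ (pvDeg maps).values := PySem.List.max?_mem hmv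
    have hub : ∀ y ∈ (pvDeg maps).values, y ≤ m := by
      intro y hy
      exact PySem.List.max?_isMax hmv y hy
    rcases (pvMemValues (pvDeg maps) (pvDegNodupKeys maps) m).1 hmmem with ⟨k, hk, hkm⟩
    have hkml : k ∈ (pvMl maps).keys := (pvDegKeysIff maps k).1 hk
    have hmsz : m = pvSz maps k := by rw [← hkm, pvDegGetD]
    apply le_antisymm
    · rcases hAmem with h0 | ⟨k', hk', he⟩
      · rw [hA, h0, hBm, hmsz]
        exact hSznn k
      · rw [hA, he, hBm]
        apply hub
        rw [← pvDegGetD maps k']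
        exact (pvMemValues (pvDeg maps) (pvDegNodupKeys maps) _).2
          ⟨k', (pvDegKeysIff maps k').2 hk', rfl⟩
    · rw [hBm, hmsz]
      exact hAub.2 _ hkml


-- ===== VERDICT (by name: the statement is the Claim_ definition above) =====
theorem solution_spec : Claim_equal_solution := by
  intro maps _ _
  unfold Spec_solution
  rw [pvCharA, pvCharB, pvMaxEq]
  congr 1
  rw [pvSumSz, pvDirELen, PySem.Int.floordiv_eq_ediv_of_pos (by norm_num)]
  omega
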